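-- pv_equiv track=rewrite | github.com/S222em/aoc | 2024/day6_a/main.py | step
-- ===== SOURCE A (Python) =====
-- def step(grid, position, direction):
--     """
--     Does a single step
--     Returns None, None if the position is out of bounds
--     :param grid:
--     :param position:
--     :param direction:
--     :return:
--     """
--     px = position[0] + direction[0]
--     py = position[1] + direction[1]
--
--     if not is_in_bounds(px, py, grid):
--         return None, None
--
--     if grid[px][py] == "#":
--         return step(grid, position, (direction[1], -direction[0]))
--
--     return (px, py), direction
--
-- def is_in_bounds(x, y, grid):
--     """
--     Whether the given x,y is in bounds
--     :param x:
--     :param y: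
--     :param grid:
--     :return:
--     """
--     x_in_bounds = 0 <= x < len(grid)
--     y_in_bounds = 0 <= y < len(grid[0])
--
--     return x_in_bounds and y_in_bounds
-- ===== SOURCE B (Python) =====
-- def step(grid, position, direction):
--     """
--     Does a single step. Iterative: the turn rule (d1, -d0) cycles after four
--     rotations, so at most four candidate cells are ever probed.
--     """
--     x, y = position
--     dx, dy = direction
--     rows, cols = len(grid), len(grid[0])
--     for _ in range(4):
--         px, py = x + dx, y + dy
--         if not (0 <= px < rows and 0 <= py < cols):
--             return None, None
--         if grid[px][py] != "#":
--             return (px, py), (dx, dy)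
--         dx, dy = dy, -dx
--     return None, None
-- ===== Notes on version B (the rewrite author's own statement) =====
-- stated objective: simpler
-- what changed: Replaces A's unbounded turn-on-obstacle recursion by a bounded iterative for-loop over the four possible rotations (the turn rule (d1,-d0) cycles after four turns), with a rotating (dx,dy) accumulator and precomputed bounds.
-- outside the precondition, e.g. on step([], (0, 0), (0, -1)): A returns (None, None), B raises IndexError
import Mathlib
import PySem

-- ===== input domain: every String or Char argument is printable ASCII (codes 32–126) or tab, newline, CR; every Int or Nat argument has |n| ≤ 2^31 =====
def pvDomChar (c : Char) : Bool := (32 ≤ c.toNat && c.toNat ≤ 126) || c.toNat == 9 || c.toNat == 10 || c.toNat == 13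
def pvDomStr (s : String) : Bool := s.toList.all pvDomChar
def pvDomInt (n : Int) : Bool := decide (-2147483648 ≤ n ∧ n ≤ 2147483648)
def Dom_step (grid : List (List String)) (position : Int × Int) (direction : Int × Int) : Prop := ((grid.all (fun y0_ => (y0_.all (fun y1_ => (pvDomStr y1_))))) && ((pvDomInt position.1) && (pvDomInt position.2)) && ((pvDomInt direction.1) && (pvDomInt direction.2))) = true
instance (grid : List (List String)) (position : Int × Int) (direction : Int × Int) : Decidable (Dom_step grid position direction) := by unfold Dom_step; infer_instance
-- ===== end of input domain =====

-- B replaces A's unbounded turn-on-obstacle recursion by a bounded iterative loop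
-- (the turn rule cycles after four rotations), a simpler decomposition; return-value
-- equivalence only, neither version mutates its arguments.

-- ===== PORT A =====
-- is_in_bounds: Python's chained `0 <= y < len(grid[0])` short-circuits, so grid[0]
-- is only evaluated when 0 ≤ y; Pre_ keeps grid nonempty, where headI = grid[0] exactly.
def isInBounds (x y : Int) (grid : List (List String)) : Bool :=
  (decide (0 ≤ x) && decide (x < (grid.length : Int))) &&
  (decide (0 ≤ y) && decide (y < ((grid.headI).length : Int)))

-- grid[px][py] == "#"; pyGet? is none exactly where Python raises IndexError (outside Pre_)
def cellAt (grid : List (List String)) (px py : Int) : Option String :=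
  (PySem.List.pyGet? grid px).bind (fun row => PySem.List.pyGet? row py)

-- A's recursion, with fuel: the turn rule (d1, -d0) cycles after 4 rotations, so on
-- every input where the Python returns (admitted by Pre_) fuel 4 is never exhausted;
-- fuel 0 marks exactly the inputs where the Python A recurses forever (RecursionError).
def stepFuel (grid : List (List String)) (position : Int × Int) :
    Nat → (Int × Int) → (Option (Int × Int)) × (Option (Int × Int))
  | 0, _ => (none, none)
  | n + 1, d =>
    let px := position.1 + d.1
    let py := position.2 + d.2
    if !(isInBounds px py grid) then (none, none)
    else if cellAt grid px py = some "#" then stepFuel grid position n (d.2, -d.1)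
    else (some (px, py), some d)

def step (grid : List (List String)) (position : Int × Int) (direction : Int × Int) : (Option (Int × Int)) × (Option (Int × Int)) :=
  stepFuel grid position 4 direction

-- ===== PORT B =====
-- Source B's for-loop over range(4) with the rotating (dx, dy) accumulator
def stepAltLoop (grid : List (List String)) (rows cols x y : Int) :
    Nat → Int → Int → (Option (Int × Int)) × (Option (Int × Int))
  | 0, _, _ => (none, none)
  | n + 1, dx, dy =>
    let px := x + dx
    let py := y + dy
    if !((decide (0 ≤ px) && decide (px < rows)) && (decide (0 ≤ py) && decide (py < cols))) then
      (none, none)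
    else if cellAt grid px py ≠ some "#" then (some (px, py), some (dx, dy))
    else stepAltLoop grid rows cols x y n dy (-dx)

def step_alt (grid : List (List String)) (position : Int × Int) (direction : Int × Int) : (Option (Int × Int)) × (Option (Int × Int)) :=
  stepAltLoop grid (grid.length : Int) ((grid.headI).length : Int)
    position.1 position.2 4 direction.1 direction.2

-- ===== PRECONDITION & SPEC =====
-- the cell probed for direction d is in bounds (per row 0's width) and holds "#"
def blockedB (grid : List (List String)) (position : Int × Int) (d : Int × Int) : Bool :=
  decide (0 ≤ position.1 + d.1) && decide (position.1 + d.1 < (grid.length : Int)) &&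
  decide (0 ≤ position.2 + d.2) && decide (position.2 + d.2 < ((grid.headI).length : Int)) &&
  decide ((PySem.List.pyGet? grid (position.1 + d.1)).bind
    (fun row => PySem.List.pyGet? row (position.2 + d.2)) = some "#")

-- if the cell probed for direction d is in bounds per row 0's width, its (possibly shorter) row reaches it
def safeB (grid : List (List String)) (position : Int × Int) (d : Int × Int) : Bool :=
  !(decide (0 ≤ position.1 + d.1) && decide (position.1 + d.1 < (grid.length : Int)) &&
    decide (0 ≤ position.2 + d.2) && decide (position.2 + d.2 < ((grid.headI).length : Int))) ||
  decide (position.2 + d.2 < ((((PySem.List.pyGet? grid (position.1 + d.1)).getD []).length : Int)))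

-- A probes at most four cells, in the fixed rotation order d0, d1, d2, d3, moving to the
-- next only while the current one is blocked. Pre_ excludes exactly the inputs where the
-- Python raises: the empty grid (IndexError from len(grid[0]) in A when the probed column
-- is ≥ 0, and in B always; on the remaining empty-grid inputs A returns (None, None) but B
-- raises, see the cite); a probed in-bounds cell beyond its ragged row's end (IndexError);
-- and all four probes blocked, where A recurses forever (RecursionError) while B returns
-- (None, None).
def Pre_step (grid : List (List String)) (position : Int × Int) (direction : Int × Int) : Prop :=
  grid ≠ [] ∧
  (let d0 := direction
   let d1 := (direction.2, -direction.1)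
   let d2 := (-direction.1, -direction.2)
   let d3 := (-direction.2, direction.1)
   (safeB grid position d0 &&
    (!blockedB grid position d0 || safeB grid position d1) &&
    (!(blockedB grid position d0 && blockedB grid position d1) || safeB grid position d2) &&
    (!(blockedB grid position d0 && blockedB grid position d1 && blockedB grid position d2) ||
      safeB grid position d3) &&
    !(blockedB grid position d0 && blockedB grid position d1 &&
      blockedB grid position d2 && blockedB grid position d3)) = true)

instance (grid : List (List String)) (position : Int × Int) (direction : Int × Int) : Decidable (Pre_step grid position direction) := by unfold Pre_step; infer_instance

def pvWitness_step : List (List String) × (Int × Int) × (Int × Int) :=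
  ([[".", "#"], [".", "."]], (0, 0), (0, 1))

def Spec_step (grid : List (List String)) (position : Int × Int) (direction : Int × Int) (out : (Option (Int × Int)) × (Option (Int × Int))) : Prop := out = step_alt grid position direction
instance (grid : List (List String)) (position : Int × Int) (direction : Int × Int) (out : (Option (Int × Int)) × (Option (Int × Int))) : Decidable (Spec_step grid position direction out) := by unfold Spec_step; infer_instance

-- ===== CLAIM (what is proved, stated in full; the proofs are below) =====
def Claim_equal_step : Prop := ∀ (grid : List (List String)) (position : Int × Int) (direction : Int × Int), Dom_step grid position direction → Pre_step grid position direction → Spec_step grid position direction (step grid position direction)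

-- ===== LEMMAS AND PROOFS =====

-- the two recursions compute the same value at every fuel, for every direction
theorem stepFuel_eq_loop (grid : List (List String)) (position : Int × Int) :
    ∀ (n : Nat) (d : Int × Int),
      stepFuel grid position n d =
        stepAltLoop grid (grid.length : Int) ((grid.headI).length : Int)
          position.1 position.2 n d.1 d.2 := by
  intro n
  induction n with
  | zero => intro d; rfl
  | succ n ih =>
    intro d
    simp only [stepFuel, stepAltLoop, isInBounds]
    by_cases hb : ((decide (0 ≤ position.1 + d.1) && decide (position.1 + d.1 < (grid.length : Int))) &&
        (decide (0 ≤ position.2 + d.2) && decide (position.2 + d.2 < ((grid.headI).length : Int)))) = true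
    · by_cases hc : cellAt grid (position.1 + d.1) (position.2 + d.2) = some "#"
      · simp [hb, hc, ih (d.2, -d.1)]
      · simp [hb, hc]
    · simp only [Bool.not_eq_true] at hb
      simp [hb]

theorem step_spec : Claim_equal_step := by
  intro grid position direction _ _
  unfold Spec_step step step_alt
  exact stepFuel_eq_loop grid position 4 direction
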